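-- pv_equiv track=rewrite | github.com/QuanDo2000/programming-exercises | codeforces/acm_icpc/2015-2016/pacific_northwest_regional_div2/u.py | blur
-- ===== SOURCE A (Python) =====
-- def blur(grid, w, h):
--     new_grid = [[0 for _ in range(w)] for _ in range(h)]
--
--     for i in range(h):
--         for j in range(w):
--             h_lo = i - 1
--             if i + 1 < h:
--                 h_hi = i + 1
--             else:
--                 h_hi = 0
--
--             w_lo = j - 1
--             if j + 1 < w:
--                 w_hi = j + 1
--             else:
--                 w_hi = 0
--             for x in [h_lo, i, h_hi]:
--                 for y in [w_lo, j, w_hi]: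
--                     new_grid[i][j] += grid[x][y]
--     return new_grid
-- ===== SOURCE B (Python) =====
-- def blur(grid, w, h):
--     # Separable 3x3 wrap-blur: one horizontal 3-tap pass, then one vertical 3-tap pass.
--     horiz = [[row[j - 1] + row[j] + (row[j + 1] if j + 1 < w else row[0])
--               for j in range(w)]
--              for row in grid]
--     return [[horiz[i - 1][j] + horiz[i][j]
--              + (horiz[i + 1][j] if i + 1 < h else horiz[0][j])
--              for j in range(w)]
--             for i in range(h)]
-- ===== Notes on version B (the rewrite author's own statement) =====
-- stated objective: alternative
-- what changed: B exploits separability of the 3x3 wrap-blur: a horizontal 3-tap pass builds an intermediate table, then a vertical 3-tap pass sums three table rows, replacing A's 9-term nested neighborhood sum per cell.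
-- outside the precondition, e.g. on blur([[1, 2], [3], [4, 5]], 2, 1): A returns [[24, 21]], B raises IndexError; on blur([[1]], 2, 0): A returns [], B raises IndexError
import Mathlib
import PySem

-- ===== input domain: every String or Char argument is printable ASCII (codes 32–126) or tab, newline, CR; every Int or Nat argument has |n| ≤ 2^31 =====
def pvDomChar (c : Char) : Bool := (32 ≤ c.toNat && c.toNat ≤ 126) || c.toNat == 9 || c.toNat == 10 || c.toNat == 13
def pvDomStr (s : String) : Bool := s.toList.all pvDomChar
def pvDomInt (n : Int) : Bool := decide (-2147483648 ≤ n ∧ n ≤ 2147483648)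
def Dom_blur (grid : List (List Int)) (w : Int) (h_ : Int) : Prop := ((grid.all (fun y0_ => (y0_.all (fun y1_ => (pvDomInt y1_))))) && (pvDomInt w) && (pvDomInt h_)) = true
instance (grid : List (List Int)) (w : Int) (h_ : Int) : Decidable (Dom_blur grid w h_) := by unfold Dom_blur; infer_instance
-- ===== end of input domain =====

-- ===== PORT A =====
-- Port of A: for each cell, sum the 9 wrap-neighbours (negative low index, high index wraps to 0).
-- Python's grid[x][y] (IndexError excluded by Pre_blur) is PySem.List.pyGetD with default 0 / [].
def blur (grid : List (List Int)) (w : Int) (h_ : Int) : List (List Int) :=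
  (PySem.List.pyRange 0 h_ 1).map (fun i =>
    (PySem.List.pyRange 0 w 1).map (fun j =>
      let h_lo := i - 1
      let h_hi := if i + 1 < h_ then i + 1 else 0
      let w_lo := j - 1
      let w_hi := if j + 1 < w then j + 1 else 0
      List.foldl (fun acc x =>
        List.foldl (fun acc y =>
          acc + PySem.List.pyGetD (PySem.List.pyGetD grid x []) y 0) acc [w_lo, j, w_hi])
        0 [h_lo, i, h_hi]))

-- ===== PORT B =====
-- B (separable blur), horizontal pass: H[r][j] = row[j-1] + row[j] + (row[j+1] if j+1<w else row[0]).
def blurHoriz (grid : List (List Int)) (w : Int) : List (List Int) :=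
  grid.map (fun row =>
    (PySem.List.pyRange 0 w 1).map (fun j =>
      PySem.List.pyGetD row (j - 1) 0 + PySem.List.pyGetD row j 0 +
        (if j + 1 < w then PySem.List.pyGetD row (j + 1) 0 else PySem.List.pyGetD row 0 0)))

-- Port of B: vertical pass over the horizontal-pass table, identical row-wrap rule.
def blur_alt (grid : List (List Int)) (w : Int) (h_ : Int) : List (List Int) :=
  let horiz := blurHoriz grid w
  (PySem.List.pyRange 0 h_ 1).map (fun i =>
    (PySem.List.pyRange 0 w 1).map (fun j =>
      PySem.List.pyGetD (PySem.List.pyGetD horiz (i - 1) []) j 0 +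
        PySem.List.pyGetD (PySem.List.pyGetD horiz i []) j 0 +
        (if i + 1 < h_ then PySem.List.pyGetD (PySem.List.pyGetD horiz (i + 1) []) j 0
         else PySem.List.pyGetD (PySem.List.pyGetD horiz 0 []) j 0)))

-- ===== PRECONDITION & SPEC =====
-- Pre_blur excludes the inputs where a Python IndexError occurs in A or B: it requires every row
-- to have length >= w (when w > 0) and the grid to have at least h_ rows (when w > 0 and h_ > 0).
-- This excludes some ragged/oversized inputs on which A still returns (rows beyond h_ that A never
-- touches, or rows shorter than w when h_ <= 0) but B's eager horizontal pass raises; see cites.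
def Pre_blur (grid : List (List Int)) (w : Int) (h_ : Int) : Prop :=
  (0 < w → ∀ row ∈ grid, w ≤ (row.length : Int)) ∧ (0 < w ∧ 0 < h_ → h_ ≤ (grid.length : Int))
instance (grid : List (List Int)) (w : Int) (h_ : Int) : Decidable (Pre_blur grid w h_) := by
  unfold Pre_blur; infer_instance

def pvWitness_blur : List (List Int) × Int × Int := ([[1, 2], [3, 4]], 2, 2)

def Spec_blur (grid : List (List Int)) (w : Int) (h_ : Int) (out : List (List Int)) : Prop := out = blur_alt grid w h_
instance (grid : List (List Int)) (w : Int) (h_ : Int) (out : List (List Int)) : Decidable (Spec_blur grid w h_ out) := by unfold Spec_blur; infer_instance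

-- ===== CLAIM (what is proved, stated in full; the proofs are below) =====
def Claim_equal_blur : Prop := ∀ (grid : List (List Int)) (w : Int) (h_ : Int), Dom_blur grid w h_ → Pre_blur grid w h_ → Spec_blur grid w h_ (blur grid w h_)

-- ===== LEMMAS AND PROOFS =====

-- indexing a mapped list (searched for; no library lemma closes it)
theorem pyGet?_map_list {α β : Type} (f : α → β) (xs : List α) (i : Int) :
    PySem.List.pyGet? (xs.map f) i = (PySem.List.pyGet? xs i).map f := by
  simp [PySem.List.pyGet?, PySem.List.pyIdx?]

-- a cell of the horizontal-pass table equals the corresponding 3-term column sum of the grid row,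
-- for EVERY row index x (out-of-range indices give 0 = 0 + 0 + 0 on both sides)
theorem blurHoriz_cell (grid : List (List Int)) (w x j : Int)
    (hj0 : 0 ≤ j) (hjw : j < w) :
    PySem.List.pyGetD (PySem.List.pyGetD (blurHoriz grid w) x []) j 0 =
      PySem.List.pyGetD (PySem.List.pyGetD grid x []) (j - 1) 0 +
        PySem.List.pyGetD (PySem.List.pyGetD grid x []) j 0 +
        (if j + 1 < w then PySem.List.pyGetD (PySem.List.pyGetD grid x []) (j + 1) 0
         else PySem.List.pyGetD (PySem.List.pyGetD grid x []) 0 0) := by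
  have hget : PySem.List.pyGetD (blurHoriz grid w) x [] =
      (PySem.List.pyGet? (blurHoriz grid w) x).getD [] := rfl
  have hgetg : PySem.List.pyGetD grid x [] = (PySem.List.pyGet? grid x).getD [] := rfl
  rw [hget, hgetg, blurHoriz, pyGet?_map_list]
  cases hx : PySem.List.pyGet? grid x with
  | none =>
      simp [PySem.List.pyGetD, PySem.List.pyGet?, PySem.List.pyIdx?]
  | some row =>
      simp only [Option.map_some, Option.getD_some]
      rw [PySem.List.pyGetD_map_pyRange_of_nonneg _ w j 0 hj0 hjw]

-- ===== VERDICT (by name: the statement is the Claim_ definition above) =====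
theorem blur_spec : Claim_equal_blur := by
  intro grid w h_ _ _
  unfold Spec_blur blur blur_alt
  apply List.map_congr_left
  intro i hi
  apply List.map_congr_left
  intro j hj
  rw [PySem.List.mem_pyRange_one] at hj
  simp only [List.foldl]
  rw [blurHoriz_cell grid w (i - 1) j hj.1 hj.2,
      blurHoriz_cell grid w i j hj.1 hj.2]
  by_cases hih : i + 1 < h_
  · rw [if_pos hih, if_pos hih, blurHoriz_cell grid w (i + 1) j hj.1 hj.2]
    split_ifs <;> ring
  · rw [if_neg hih, if_neg hih, blurHoriz_cell grid w 0 j hj.1 hj.2]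
    split_ifs <;> ring
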